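-- pv_equiv track=rewrite | github.com/relativehysteria/poetry_framework | src/poetry.py | correct_quotes
-- ===== SOURCE A (Python) =====
-- from typing import List
--
-- def correct_quotes(stanzas: List[List[str]]) -> List[List[str]]:
--     """Replaces opening quotes with `` and ''; keeps ending quotes."""
--     in_quote = False
--     for stanza in stanzas:
--         for i, line in enumerate(stanza):
--             new_line = []
--             idx = 0
--             while idx < len(line):
--                 char = line[idx]
--
--                 # Double quotes
--                 if char == '"':
--                     if in_quote:
--                         new_line.append("''")
--                         in_quote = False
--                     else:
--                         new_line.append("``")
--                         in_quote = True
--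
--                 # Single quotes, apostrophe etc
--                 elif char == "'":
--                     if idx == 0 or new_line[idx-1].isspace():
--                         new_line.append("`")
--                     else:
--                         new_line.append("'")
--
--                 else:
--                     new_line.append(char)
--                 idx += 1
--             stanza[i] = "".join(new_line)
--
--     return stanzas
-- ===== SOURCE B (Python) =====
-- from typing import List
--
-- def correct_quotes(stanzas: List[List[str]]) -> List[List[str]]:
--     """Replaces opening quotes with `` and ''; keeps ending quotes."""
--     in_quote = False
--     for stanza in stanzas:
--         for i, line in enumerate(stanza):
--             # Single quotes: backtick at line start or after whitespace.
--             singles = "".join(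
--                 "`" if c == "'" and (j == 0 or line[j - 1].isspace()) else c
--                 for j, c in enumerate(line)
--             )
--             # Double quotes: split and rejoin, alternating `` / '' with a
--             # running in_quote flag carried across all lines and stanzas.
--             parts = singles.split('"')
--             out = parts[0]
--             for part in parts[1:]:
--                 out += "''" if in_quote else "``"
--                 in_quote = not in_quote
--                 out += part
--             stanza[i] = out
--     return stanzas
-- ===== Notes on version B (the rewrite author's own statement) =====
-- stated objective: idiomatic
-- what changed: A's single index-driven character loop (appending per-character tokens and peeking back into the built list) is replaced by two idiomatic passes per line: a single-quote pass that backticks a quote at line start or after whitespace by looking at the previous character of the original line, and a double-quote pass that splits the line on '"' and rejoins the parts with alternating `` / '' driven by the running in_quote flag.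
import Mathlib
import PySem

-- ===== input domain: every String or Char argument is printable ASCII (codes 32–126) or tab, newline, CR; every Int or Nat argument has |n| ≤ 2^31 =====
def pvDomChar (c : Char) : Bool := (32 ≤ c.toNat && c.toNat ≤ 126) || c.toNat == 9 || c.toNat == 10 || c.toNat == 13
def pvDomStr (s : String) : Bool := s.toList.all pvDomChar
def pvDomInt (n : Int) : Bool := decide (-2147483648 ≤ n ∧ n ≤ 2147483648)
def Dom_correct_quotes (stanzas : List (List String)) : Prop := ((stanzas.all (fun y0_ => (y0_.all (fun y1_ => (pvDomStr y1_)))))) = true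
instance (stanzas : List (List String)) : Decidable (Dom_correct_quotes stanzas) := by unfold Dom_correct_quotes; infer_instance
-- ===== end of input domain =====

-- B replaces A's single index-driven character loop by a whitespace-lookback pass for
-- single quotes plus a split-on-'"'/alternating-rejoin pass for double quotes
-- (objective: idiomatic decomposition, same cost). Both Pythons mutate the inner
-- stanza lists in place identically; the theorems are about the returned value.

-- ===== PORT A =====
-- the 'while idx < len(line)' loop: state (idx, new_line, in_quote)
def pvLoopA : List Char → Nat → List (List Char) → Bool → (List (List Char)) × Bool
  | [], _, nl, q => (nl, q)
  | c :: rest, idx, nl, q =>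
    if c == '"' then
      if q then pvLoopA rest (idx + 1) (nl ++ [['\'', '\'']]) false
      else pvLoopA rest (idx + 1) (nl ++ [['`', '`']]) true
    else if c == '\'' then
      -- new_line[idx-1] is always in range here (len(new_line) = idx ≥ 1),
      -- so the `.getD []` default is unreachable
      if idx == 0 || PySem.Chars.strIsspace ((PySem.List.pyGet? nl ((idx : Int) - 1)).getD []) then
        pvLoopA rest (idx + 1) (nl ++ [['`']]) q
      else
        pvLoopA rest (idx + 1) (nl ++ [['\'']]) q
    else pvLoopA rest (idx + 1) (nl ++ [[c]]) q

def pvLineA (line : String) (q : Bool) : String × Bool :=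
  let r := pvLoopA line.toList 0 [] q
  (String.ofList (PySem.Chars.join [] r.1), r.2)

def pvStanzaA (stanza : List String) (q : Bool) : List String × Bool :=
  stanza.foldl (fun acc line =>
    let r := pvLineA line acc.2
    (acc.1 ++ [r.1], r.2)) ([], q)

def correct_quotes (stanzas : List (List String)) : List (List String) :=
  (stanzas.foldl (fun acc stanza =>
    let r := pvStanzaA stanza acc.2
    (acc.1 ++ [r.1], r.2)) (([] : List (List String)), false)).1

-- ===== PORT B =====
-- '`' iff at line start or the previous character of the original line is whitespace
def pvPrevSpaceB (line : List Char) (j : Int) : Bool :=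
  j == 0 || (match PySem.List.pyGet? line (j - 1) with
             | some d => PySem.Chars.isspace d
             | none => false)

-- the single-quote pass: the generator over enumerate(line)
def pvSinglesB (line : List Char) : List Char :=
  (PySem.List.enumerate line 0).map (fun jc =>
    if jc.2 == '\'' && pvPrevSpaceB line jc.1 then '`' else jc.2)

-- the double-quote pass: split on '"' and rejoin with alternating `` / ''
def pvLineB (line : String) (q : Bool) : String × Bool :=
  let parts := PySem.Chars.splitOn (pvSinglesB line.toList) ['"']
  let r := parts.tail.foldl (fun acc part =>
    (acc.1 ++ (if acc.2 then ['\'', '\''] else ['`', '`']) ++ part, !acc.2))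
    (parts.headD [], q)
  (String.ofList r.1, r.2)

def pvStanzaB (stanza : List String) (q : Bool) : List String × Bool :=
  stanza.foldl (fun acc line =>
    let r := pvLineB line acc.2
    (acc.1 ++ [r.1], r.2)) ([], q)

def correct_quotes_alt (stanzas : List (List String)) : List (List String) :=
  (stanzas.foldl (fun acc stanza =>
    let r := pvStanzaB stanza acc.2
    (acc.1 ++ [r.1], r.2)) (([] : List (List String)), false)).1

-- ===== PRECONDITION & SPEC =====
def Spec_correct_quotes (stanzas : List (List String)) (out : List (List String)) : Prop := out = correct_quotes_alt stanzas
instance (stanzas : List (List String)) (out : List (List String)) : Decidable (Spec_correct_quotes stanzas out) := by unfold Spec_correct_quotes; infer_instance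

-- ===== CLAIM (what is proved, stated in full; the proofs are below) =====
def Claim_equal_correct_quotes : Prop := ∀ (stanzas : List (List String)), Dom_correct_quotes stanzas → Spec_correct_quotes stanzas (correct_quotes stanzas)

-- ===== LEMMAS AND PROOFS =====

-- Common specification of one character step: (emitted token, new in_quote),
-- given ps = "previous char is whitespace or we are at line start".
def pvTok (ps q : Bool) (c : Char) : List Char × Bool :=
  if c = '"' then (if q then ['\'', '\''] else ['`', '`'], !q)
  else if c = '\'' then (if ps then ['`'] else ['\''], q)
  else ([c], q)

def pvToks : Bool → Bool → List Char → List (List Char) × Bool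
  | _, q, [] => ([], q)
  | ps, q, c :: rest =>
    let t := pvTok ps q c
    let r := pvToks (PySem.Chars.isspace c) t.2 rest
    (t.1 :: r.1, r.2)

-- clean recursion equal to splitOn · ['"']
def pvSplit (pre : List Char) : List Char → List (List Char)
  | [] => [pre]
  | c :: rest => if c = '"' then pre :: pvSplit [] rest else pvSplit (pre ++ [c]) rest

-- clean recursion for B's alternating rejoin over the tail of the parts
def pvAJ : List (List Char) → Bool → List Char × Bool
  | [], q => ([], q)
  | p :: ps, q =>
    let r := pvAJ ps (!q)
    ((if q then ['\'', '\''] else ['`', '`']) ++ p ++ r.1, r.2)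

-- clean recursion for the single-quote pass, carrying ps
def pvSingles : Bool → List Char → List Char
  | _, [] => []
  | ps, c :: rest => (if c == '\'' && ps then '`' else c) :: pvSingles (PySem.Chars.isspace c) rest

lemma strIsspace_singleton (c : Char) :
    PySem.Chars.strIsspace [c] = PySem.Chars.isspace c := by
  simp [PySem.Chars.strIsspace]

lemma join_nil_eq_flatten (parts : List (List Char)) :
    PySem.Chars.join [] parts = parts.flatten := by
  induction parts with
  | nil => simp [PySem.Chars.join, List.intercalate]
  | cons h t ih =>
    cases t with
    | nil => simp [PySem.Chars.join, List.intercalate]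
    | cons b t' =>
      rw [PySem.Chars.join_cons_cons]
      simpa using congrArg (h ++ ·) ih

-- A's loop-entry condition for the NEXT character, after appending token t
lemma cond_concat (nl : List (List Char)) (t : List Char) :
    (decide ((nl ++ [t]).length = 0) ||
      PySem.Chars.strIsspace ((PySem.List.pyGet? (nl ++ [t]) (((nl ++ [t]).length : Int) - 1)).getD []))
    = PySem.Chars.strIsspace t := by
  have h1 : (((nl ++ [t]).length : Int) - 1) = ((nl.length : Nat) : Int) := by
    simp
  rw [h1, PySem.List.pyGet?_natCast]
  simp

lemma loopA_eq (rest : List Char) : ∀ (nl : List (List Char)) (q ps : Bool),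
    (decide (nl.length = 0) ||
      PySem.Chars.strIsspace ((PySem.List.pyGet? nl ((nl.length : Int) - 1)).getD [])) = ps →
    pvLoopA rest nl.length nl q = (nl ++ (pvToks ps q rest).1, (pvToks ps q rest).2) := by
  induction rest with
  | nil => intro nl q ps h; simp [pvLoopA, pvToks]
  | cons c cs ih =>
    intro nl q ps h
    rw [pvLoopA]
    by_cases hdq : c = '"'
    · subst hdq
      simp only [BEq.rfl, if_true]
      cases q
      · simp only [Bool.false_eq_true, if_false]
        have h2 := cond_concat nl ['`','`']
        rw [show nl.length + 1 = (nl ++ [['`','`']]).length by simp,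
            ih (nl ++ [['`','`']]) true _ h2]
        simp [pvToks, pvTok, show PySem.Chars.strIsspace ['`','`'] = false by decide,
              show PySem.Chars.isspace '"' = false by decide]
      · simp only [if_true]
        have h2 := cond_concat nl ['\'','\'']
        rw [show nl.length + 1 = (nl ++ [['\'','\'']]).length by simp,
            ih (nl ++ [['\'','\'']]) false _ h2]
        simp [pvToks, pvTok, show PySem.Chars.strIsspace ['\'','\''] = false by decide,
              show PySem.Chars.isspace '"' = false by decide]
    · have hdq' : (c == '"') = false := by simp [hdq]
      rw [hdq']
      simp only [Bool.false_eq_true, if_false]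
      by_cases hsq : c = '\''
      · subst hsq
        simp only [BEq.rfl, if_true]
        rw [show (nl.length == 0) = decide (nl.length = 0) by cases nl.length <;> rfl, h]
        cases ps
        · simp only [Bool.false_eq_true, if_false]
          have h2 := cond_concat nl ['\'']
          rw [show nl.length + 1 = (nl ++ [['\'']]).length by simp,
              ih (nl ++ [['\'']]) q _ h2]
          simp [pvToks, pvTok, strIsspace_singleton]
        · simp only [if_true]
          have h2 := cond_concat nl ['`']
          rw [show nl.length + 1 = (nl ++ [['`']]).length by simp,
              ih (nl ++ [['`']]) q _ h2]
          simp [pvToks, pvTok, show PySem.Chars.strIsspace ['`'] = false by decide,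
                show PySem.Chars.isspace '\'' = false by decide]
      · have hsq' : (c == '\'') = false := by simp [hsq]
        rw [hsq']
        simp only [Bool.false_eq_true, if_false]
        have h2 := cond_concat nl [c]
        rw [show nl.length + 1 = (nl ++ [[c]]).length by simp,
            ih (nl ++ [[c]]) q _ h2]
        simp [pvToks, pvTok, hdq, hsq, strIsspace_singleton]

lemma go_eq : ∀ (fuel : Nat) (l cur : List Char) (accs : List (List Char)),
    l.length < fuel →
    PySem.Chars.splitOn.go ['"'] fuel l cur accs = accs.reverse ++ pvSplit cur.reverse l := by
  intro fuel
  induction fuel with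
  | zero => intro l cur accs h; omega
  | succ n ih =>
    intro l cur accs h
    cases l with
    | nil => simp [PySem.Chars.splitOn.go, pvSplit]
    | cons c rest =>
      rw [PySem.Chars.splitOn.go]
      by_cases hc : c = '"'
      · subst hc
        simp only [List.isPrefixOf, BEq.rfl, Bool.true_and, if_true]
        rw [ih _ _ _ (by simpa using Nat.lt_of_succ_lt_succ h)]
        simp [pvSplit]
      · have : (['"'].isPrefixOf (c :: rest)) = false := by
          simp [List.isPrefixOf]; exact fun h' => absurd h'.symm hc
        rw [this]
        simp only [Bool.false_eq_true, if_false]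
        rw [ih _ _ _ (by simpa using Nat.lt_of_succ_lt_succ h)]
        simp [pvSplit, hc]

lemma splitOn_eq (s : List Char) : PySem.Chars.splitOn s ['"'] = pvSplit [] s := by
  rw [PySem.Chars.splitOn, go_eq _ _ _ _ (by omega)]; simp

lemma pvSplit_pre (s : List Char) : ∀ pre,
    pvSplit pre s = (pre ++ (pvSplit [] s).headD []) :: (pvSplit [] s).tail := by
  induction s with
  | nil => intro pre; simp [pvSplit]
  | cons c rest ih =>
    intro pre
    by_cases hc : c = '"' <;> simp only [pvSplit, hc, if_true, if_false]
    · simp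
    · rw [ih (pre ++ [c]), ih ([] ++ [c])]; simp

lemma foldl_AJ (parts : List (List Char)) : ∀ (out : List Char) (q : Bool),
    parts.foldl (fun acc part =>
      (acc.1 ++ (if acc.2 then ['\'', '\''] else ['`', '`']) ++ part, !acc.2)) (out, q)
    = (out ++ (pvAJ parts q).1, (pvAJ parts q).2) := by
  induction parts with
  | nil => intro out q; simp [pvAJ]
  | cons p ps ih =>
    intro out q
    simp only [List.foldl_cons, pvAJ, ih]
    simp

lemma singles_eq (full : List Char) : ∀ (suf pre : List Char), full = pre ++ suf →
    ∀ ps : Bool, ps = (match pre.getLast? with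
                       | none => true
                       | some d => PySem.Chars.isspace d) →
    (PySem.List.enumerate suf (pre.length : Int)).map (fun jc =>
      if jc.2 == '\'' && pvPrevSpaceB full jc.1 then '`' else jc.2) = pvSingles ps suf := by
  intro suf
  induction suf with
  | nil => intro pre _ ps _; simp [pvSingles]
  | cons c rest ih =>
    intro pre hfull ps hps
    have hprev : pvPrevSpaceB full (pre.length : Int) = ps := by
      cases pre with
      | nil => simpa [pvPrevSpaceB] using hps.symm
      | cons p pre' =>
        have hj : (((p :: pre').length : Nat) : Int) - 1 = ((pre'.length : Nat) : Int) := by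
          simp
        have hget : PySem.List.pyGet? full ((pre'.length : Nat) : Int) = (p :: pre').getLast? := by
          rw [PySem.List.pyGet?_natCast, hfull]
          rw [List.getElem?_append_left (by simp)]
          rw [List.getLast?_eq_getElem?]
          simp
        rw [pvPrevSpaceB, hj, hget]
        cases hlast : (p :: pre').getLast? with
        | none => simp at hlast
        | some d =>
          rw [hlast] at hps
          simp [hps]
          exact fun h0 => absurd h0 (by omega)
    have hstep : ((pre.length : Int) + 1) = (((pre ++ [c]).length : Nat) : Int) := by
      simp
    rw [PySem.List.enumerate_cons, List.map_cons, pvSingles]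
    congr 1
    · simpa using congrArg (fun b => if (c == '\'' && b) then '`' else c) hprev
    · rw [hstep, ih (pre ++ [c]) (by simp [hfull]) (PySem.Chars.isspace c) (by simp)]

lemma AJ_toks (chars : List Char) : ∀ (ps q : Bool),
    (((pvSplit [] (pvSingles ps chars)).headD []) ++
        (pvAJ (pvSplit [] (pvSingles ps chars)).tail q).1,
     (pvAJ (pvSplit [] (pvSingles ps chars)).tail q).2)
    = ((pvToks ps q chars).1.flatten, (pvToks ps q chars).2) := by
  induction chars with
  | nil => intro ps q; simp [pvSingles, pvSplit, pvAJ, pvToks]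
  | cons c rest ih =>
    intro ps q
    by_cases hdq : c = '"'
    · subst hdq
      have hsingles : pvSingles ps ('"' :: rest)
          = '"' :: pvSingles (PySem.Chars.isspace '"') rest := by
        simp [pvSingles]
      rw [hsingles]
      simp only [pvSplit, if_true]
      have hP := pvSplit_pre (pvSingles (PySem.Chars.isspace '"') rest) []
      rw [hP]
      simp only [List.headD_cons, List.tail_cons, pvAJ, List.nil_append]
      have hs := ih false (!q)
      simp only [pvToks, pvTok, if_true, List.flatten_cons,
                 show PySem.Chars.isspace '"' = false by decide]
      rw [Prod.mk.injEq] at hs ⊢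
      exact ⟨by rw [List.append_assoc, hs.1], hs.2⟩
    · have htok : pvTok ps q c = ([if c == '\'' && ps then '`' else c], q) := by
        by_cases h1 : c = '\'' <;> cases ps <;> simp [pvTok, h1, hdq]
      have hc' : ¬ (if c == '\'' && ps then '`' else c) = '"' := by
        by_cases h1 : c = '\'' <;> cases ps <;> simp [h1, hdq]
      have hsingles : pvSingles ps (c :: rest)
          = (if c == '\'' && ps then '`' else c) :: pvSingles (PySem.Chars.isspace c) rest := by
        simp [pvSingles]
      rw [hsingles]
      simp only [pvSplit, hc', if_false]
      rw [pvSplit_pre (pvSingles (PySem.Chars.isspace c) rest) ([] ++ [if c == '\'' && ps then '`' else c])]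
      simp only [List.nil_append, List.headD_cons, List.tail_cons]
      have hs := ih (PySem.Chars.isspace c) q
      simp only [pvToks, htok, List.flatten_cons]
      rw [Prod.mk.injEq] at hs ⊢
      refine ⟨?_, hs.2⟩
      simp only [List.nil_append, List.cons_append, hs.1]

lemma line_eq (line : String) (q : Bool) : pvLineA line q = pvLineB line q := by
  unfold pvLineA pvLineB
  rw [show (0 : Nat) = ([] : List (List Char)).length from rfl,
      loopA_eq line.toList [] q true (by decide)]
  have hsing : pvSinglesB line.toList = pvSingles true line.toList := by
    unfold pvSinglesB
    have := singles_eq line.toList line.toList [] (by simp) true (by simp)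
    simpa using this
  simp only [hsing, splitOn_eq, foldl_AJ]
  have h := AJ_toks line.toList true q
  rw [Prod.mk.injEq] at h ⊢
  refine ⟨?_, h.2.symm⟩
  rw [h.1, join_nil_eq_flatten]
  simp

lemma stanza_eq (stanza : List String) (q : Bool) : pvStanzaA stanza q = pvStanzaB stanza q := by
  unfold pvStanzaA pvStanzaB
  exact PySem.List.foldl_congr_mem _ _ _ _ (fun acc line _ => by rw [line_eq])

-- ===== VERDICT (by name: the statement is the Claim_ definition above) =====
theorem correct_quotes_spec : Claim_equal_correct_quotes := by
  intro stanzas _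
  unfold Spec_correct_quotes correct_quotes correct_quotes_alt
  rw [PySem.List.foldl_congr_mem _ _ _ _ (fun acc st _ => by rw [stanza_eq])]
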